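-- pv_equiv track=rewrite | github.com/devill/aoc | 2023/day13.py | desmudge
-- ===== SOURCE A (Python) =====
-- def desmudge(pattern):
--     smudge = horizontal_smudges(pattern)
--     if not smudge:
--         transposed_pattern = [list(row) for row in zip(*pattern)]
--         smudge = horizontal_smudges(transposed_pattern)
--         smudge = (smudge[1],smudge[0])
--     if smudge:
--         result = [l[:] for l in pattern]
--         result[smudge[0]][smudge[1]] = '#'
--         return result
--     return None
--
-- def horizontal_smudges(pattern):
--     l = len(pattern)
--     for i in range(1, l):
--         w = min(i, l - i)
--         smudges = horizontal_sub_smudges(pattern[i-w:i+w])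
--         if len(smudges) == 1:
--             return (smudges[0][0] + (i - w), smudges[0][1])
--     return None
--
-- def horizontal_sub_smudges(pattern):
--     num_rows = len(pattern)
--     smudges = []
--     for i in range(num_rows // 2):
--         for j in range(len(pattern[i])):
--             if pattern[i][j] != pattern[num_rows - i - 1][j]:
--                 if pattern[i][j] == '.':
--                     smudges.append((i,j))
--                 else:
--                     smudges.append((num_rows - i - 1,j))
--     return smudges
-- ===== SOURCE B (Python) =====
-- def desmudge(pattern):
--     s = _table_smudge(pattern)
--     if s is None:
--         cols = [list(c) for c in zip(*pattern)]
--         t = _table_smudge(cols)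
--         s = (t[1], t[0])  # a mirror line is guaranteed in one orientation
--     r, c = s
--     out = [row[:] for row in pattern]
--     out[r][c] = '#'
--     return out
--
-- def _table_smudge(grid):
--     # Precompute the pairwise row-difference table once; the candidate-line loop
--     # is then pure arithmetic over the table and touches no grid cell.
--     n = len(grid)
--     diff = [[sum(x != y for x, y in zip(ra, rb)) for rb in grid] for ra in grid]
--     for i in range(1, n):
--         lo = max(0, 2 * i - n)
--         if sum(diff[a][2 * i - 1 - a] for a in range(lo, i)) == 1:
--             a = next(a for a in range(lo, i) if diff[a][2 * i - 1 - a] == 1)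
--             b = 2 * i - 1 - a
--             j = next(j for j in range(min(len(grid[a]), len(grid[b])))
--                      if grid[a][j] != grid[b][j])
--             return (a, j) if grid[a][j] == '.' else (b, j)
--     return None
-- ===== Notes on version B (the rewrite author's own statement) =====
-- stated objective: alternative
-- what changed: B precomputes an n-by-n pairwise row-difference-count table once (zip-based, one comprehension), so the candidate-reflection-line loop is pure arithmetic summing table entries with no cell comparisons, and only the unique differing pair of the accepted line is re-scanned to locate the smudge cell; A instead slices a window per candidate line and collects every mismatched cell into a list.
import Mathlib
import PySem

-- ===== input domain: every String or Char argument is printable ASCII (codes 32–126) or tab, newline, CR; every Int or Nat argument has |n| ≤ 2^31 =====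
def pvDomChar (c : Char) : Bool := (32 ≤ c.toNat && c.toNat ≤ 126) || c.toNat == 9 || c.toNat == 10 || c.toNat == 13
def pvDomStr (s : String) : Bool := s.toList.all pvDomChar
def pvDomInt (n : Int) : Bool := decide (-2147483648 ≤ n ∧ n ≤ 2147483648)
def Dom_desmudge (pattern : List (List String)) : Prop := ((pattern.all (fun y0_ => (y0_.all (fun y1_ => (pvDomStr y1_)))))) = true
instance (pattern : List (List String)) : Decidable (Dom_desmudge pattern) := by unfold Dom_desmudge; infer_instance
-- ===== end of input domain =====

-- B precomputes an n×n pairwise row-difference-count table once, so the candidate-reflection-line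
-- loop is pure table arithmetic with no cell comparisons; only the unique differing pair of the
-- accepted line is re-scanned (objective: alternative; A and B agree wherever A returns).

-- ===== PORT A =====
-- shared helper: 'result = [l[:] for l in pattern]; result[r][c] = '#''  (both Pythons contain this
-- exact assignment; r, c are nonnegative in-range indices at every call site admitted by Pre_,
-- where .toNat/set is exact)
def pvApply (pattern : List (List String)) (r c : Int) : List (List String) :=
  pattern.set r.toNat ((pattern.getD r.toNat []).set c.toNat "#")

-- '[list(row) for row in zip(*pattern)]' in A; zip truncates every row to the shortest row's length
def pvZipT (p : List (List String)) : List (List String) :=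
  match p with
  | [] => []
  | r0 :: _ =>
    (List.range (p.foldl (fun m r => min m r.length) r0.length)).map
      (fun j => p.map (fun row => row.getD j ""))

-- horizontal_sub_smudges (indices are nonnegative and in range wherever Python does not raise,
-- so Nat getD is exact there)
def pvHSS (sub : List (List String)) : List (Int × Int) :=
  let n := sub.length
  (List.range (n / 2)).foldl
    (fun acc i =>
      (List.range (sub.getD i []).length).foldl
        (fun acc2 j =>
          if (sub.getD i []).getD j "" ≠ (sub.getD (n - i - 1) []).getD j "" then
            acc2 ++ [if (sub.getD i []).getD j "" = "." then ((i : Int), (j : Int))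
                     else (((n - i - 1 : Nat) : Int), (j : Int))]
          else acc2)
        acc)
    []

-- horizontal_smudges
def pvHS (pattern : List (List String)) : Option (Int × Int) :=
  let l := pattern.length
  (List.range' 1 (l - 1)).findSome? (fun i =>
    let w := min i (l - i)
    let s := pvHSS (PySem.List.slice pattern (some ((i : Int) - (w : Int))) (some ((i : Int) + (w : Int))))
    if s.length = 1 then
      some ((s.headD (0, 0)).1 + ((i : Int) - (w : Int)), (s.headD (0, 0)).2)
    else none)

def desmudge (pattern : List (List String)) : Option (List (List String)) :=
  match pvHS pattern with
  | some (r, c) => some (pvApply pattern r c)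
  | none =>
    match pvHS (pvZipT pattern) with
    | some (r, c) => some (pvApply pattern c r)   -- smudge = (smudge[1], smudge[0])
    | none => none                                -- Python raises TypeError here (outside Pre_)

-- ===== PORT B =====
-- 'sum(x != y for x, y in zip(ra, rb))'
def pvZipDiff (r s : List String) : Nat := (r.zip s).countP (fun p => p.1 ≠ p.2)

-- 'diff = [[sum(...) for rb in grid] for ra in grid]': the pairwise difference table, built once
def pvTable (grid : List (List String)) : List (List Nat) :=
  grid.map (fun ra => grid.map (fun rb => pvZipDiff ra rb))

-- '[list(c) for c in zip(*pattern)]' in B (B's own transliteration of that line)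
def pvZipTB (p : List (List String)) : List (List String) :=
  match p with
  | [] => []
  | r0 :: _ =>
    (List.range (p.foldl (fun m r => min m r.length) r0.length)).map
      (fun j => p.map (fun row => row.getD j ""))

-- _table_smudge: the candidate loop reads only the table; the grid is touched again only to
-- locate the single differing cell of the accepted line
def pvFindT (grid : List (List String)) : Option (Int × Int) :=
  let n := grid.length
  let diff := pvTable grid
  (List.range' 1 (n - 1)).findSome? (fun i =>
    let lo := 2 * i - n                           -- max(0, 2*i - n): Nat subtraction truncates
    if ((List.range' lo (i - lo)).map (fun a => (diff.getD a []).getD (2 * i - 1 - a) 0)).sum = 1 then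
      match (List.range' lo (i - lo)).find? (fun a => (diff.getD a []).getD (2 * i - 1 - a) 0 = 1) with
      | none => none   -- unreachable (Python's next would raise): a window summing to 1 has an entry 1
      | some a =>
        match (List.range (min (grid.getD a []).length (grid.getD (2 * i - 1 - a) []).length)).find?
            (fun j => (grid.getD a []).getD j "" ≠ (grid.getD (2 * i - 1 - a) []).getD j "") with
        | none => none   -- unreachable likewise: that pair has exactly one differing column
        | some j =>
          some (if (grid.getD a []).getD j "" = "." then ((a : Int), (j : Int))
                else (((2 * i - 1 - a : Nat) : Int), (j : Int)))
    else none)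

def desmudge_alt (pattern : List (List String)) : Option (List (List String)) :=
  match pvFindT pattern with
  | some (r, c) => some (pvApply pattern r c)
  | none =>
    match pvFindT (pvZipTB pattern) with
    | some (r, c) => some (pvApply pattern c r)   -- s = (t[1], t[0])
    | none => none                                -- Python B raises TypeError here (outside Pre_)

-- ===== PRECONDITION & SPEC =====
-- column indices (within row a's length, A's scan range) where rows a and b of g differ
def pvDC (g : List (List String)) (a b : Nat) : List Nat :=
  (List.range (g.getD a []).length).filter
    (fun j => (g.getD a []).getD j "" ≠ (g.getD b []).getD j "")

-- number of mismatched mirrored cells across candidate reflection line i, as A counts them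
def pvCnt (g : List (List String)) (i : Nat) : Nat :=
  ((List.range' (2 * i - g.length) (i - (2 * i - g.length))).map
    (fun a => (pvDC g a (2 * i - 1 - a)).length)).sum

-- line i's scan is IndexError-free: in every mirrored pair the upper row is no longer than the lower
def pvOK (g : List (List String)) (i : Nat) : Bool :=
  (List.range' (2 * i - g.length) (i - (2 * i - g.length))).all
    (fun a => (g.getD a []).length ≤ (g.getD (2 * i - 1 - a) []).length)

-- the transposed grid, as Pre_ speaks about it (same content as the ports' own transliterations)
def pvColsP (p : List (List String)) : List (List String) :=
  match p with
  | [] => []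
  | r0 :: _ =>
    (List.range (p.foldl (fun m r => min m r.length) r0.length)).map
      (fun j => p.map (fun row => row.getD j ""))

-- Pre_ is exactly the inputs on which A returns normally: the horizontal scan reaches a line with
-- exactly one mismatched cell before any IndexError, or it finishes raise-free without a match and
-- the transposed scan finds such a line (otherwise A raises IndexError or TypeError).
def Pre_desmudge (pattern : List (List String)) : Prop :=
  (∃ i ∈ Finset.Ico 1 pattern.length, (pvCnt pattern i = 1 ∧ pvOK pattern i = true) ∧
     ∀ i' ∈ Finset.Ico 1 i, pvCnt pattern i' ≠ 1 ∧ pvOK pattern i' = true) ∨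
  ((∀ i ∈ Finset.Ico 1 pattern.length, pvCnt pattern i ≠ 1 ∧ pvOK pattern i = true) ∧
   ∃ i ∈ Finset.Ico 1 (pvColsP pattern).length, pvCnt (pvColsP pattern) i = 1)

instance (pattern : List (List String)) : Decidable (Pre_desmudge pattern) := by
  unfold Pre_desmudge; infer_instance

def pvWitness_desmudge : List (List String) := [[".", "#"], ["#", "#"]]

def Spec_desmudge (pattern : List (List String)) (out : Option (List (List String))) : Prop := out = desmudge_alt pattern
instance (pattern : List (List String)) (out : Option (List (List String))) : Decidable (Spec_desmudge pattern out) := by unfold Spec_desmudge; infer_instance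

-- ===== CLAIM (what is proved, stated in full; the proofs are below) =====
def Claim_equal_desmudge : Prop := ∀ (pattern : List (List String)), Dom_desmudge pattern → Pre_desmudge pattern → Spec_desmudge pattern (desmudge pattern)

-- ===== LEMMAS AND PROOFS =====

-- the coordinate A and B record for a mismatch at column j of the pair (a, b): the '.'-side row
def pvPick (g : List (List String)) (a b j : Nat) : Int × Int :=
  if (g.getD a []).getD j "" = "." then ((a : Int), (j : Int)) else ((b : Int), (j : Int))

-- all recorded smudges of the mirrored pair (a, 2i-1-a), in absolute coordinates
def pvPairD (g : List (List String)) (i a : Nat) : List (Int × Int) :=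
  (pvDC g a (2 * i - 1 - a)).map (pvPick g a (2 * i - 1 - a))

-- canonical value of candidate line i (both programs' per-line results reduce to this)
def pvLine (g : List (List String)) (i : Nat) : Option (Int × Int) :=
  let L := (List.range' (2 * i - g.length) (i - (2 * i - g.length))).flatMap (pvPairD g i)
  if L.length = 1 then some (L.headD (0, 0)) else none

theorem pv_findSome?_congr {α β : Type} {l : List α} {f g : α → Option β}
    (h : ∀ a ∈ l, f a = g a) : l.findSome? f = l.findSome? g := by
  induction l with
  | nil => rfl
  | cons a t ih =>
    simp only [List.findSome?_cons, h a (List.mem_cons_self)]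
    cases g a with
    | some b => rfl
    | none => exact ih (fun x hx => h x (List.mem_cons_of_mem _ hx))

theorem pv_findSome?_prefix {α β : Type} (l₁ l₂ : List α) (x : α) (f : α → Option β) (v : β)
    (h1 : ∀ a ∈ l₁, f a = none) (h2 : f x = some v) :
    (l₁ ++ x :: l₂).findSome? f = some v := by
  induction l₁ with
  | nil => simp [h2]
  | cons a t ih =>
    simp only [List.cons_append, List.findSome?_cons, h1 a (List.mem_cons_self)]
    exact ih (fun y hy => h1 y (List.mem_cons_of_mem _ hy))

theorem pv_find?_congr {α : Type} {l : List α} {p q : α → Bool}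
    (h : ∀ a ∈ l, p a = q a) : l.find? p = l.find? q := by
  induction l with
  | nil => rfl
  | cons a t ih =>
    simp only [List.find?_cons, h a (List.mem_cons_self)]
    cases q a <;> simp_all [fun x hx => h x (List.mem_cons_of_mem a hx)]

theorem pv_find?_of_filter {α : Type} {l : List α} {p : α → Bool} {x : α} {t : List α}
    (h : l.filter p = x :: t) : l.find? p = some x := by
  induction l with
  | nil => simp at h
  | cons a l' ih =>
    rw [List.filter_cons] at h
    by_cases hp : p a
    · simp [hp] at h
      rw [List.find?_cons_of_pos hp, h.1]
    · simp [hp] at h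
      rw [List.find?_cons_of_neg hp]
      exact ih h

theorem pv_zip_eq_map_range (r s : List String) :
    r.zip s = (List.range (min r.length s.length)).map (fun j => (r.getD j "", s.getD j "")) := by
  induction r generalizing s with
  | nil => simp
  | cons a r' ih =>
    cases s with
    | nil => simp
    | cons b s' =>
      simp only [List.zip_cons_cons, List.length_cons, Nat.succ_min_succ,
        List.range_succ_eq_map, List.map_cons, List.map_map]
      exact congrArg _ (ih s')

-- under 'no raise' for the pair (upper row no longer than lower), B's zip count is A's count
theorem pv_zipDiff_eq_DC (g : List (List String)) (a b : Nat)
    (h : (g.getD a []).length ≤ (g.getD b []).length) :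
    pvZipDiff (g.getD a []) (g.getD b []) = (pvDC g a b).length := by
  unfold pvZipDiff pvDC
  rw [pv_zip_eq_map_range, List.countP_map, min_eq_left h, List.countP_eq_length_filter]
  rfl

theorem pv_table_getD (g : List (List String)) (a b : Nat) (ha : a < g.length) (hb : b < g.length) :
    (((pvTable g).getD a []).getD b 0) = pvZipDiff (g.getD a []) (g.getD b []) := by
  simp [pvTable, List.getD_eq_getElem?_getD, ha, hb]

theorem pv_flatMap_nil_of_sum_zero {α β : Type} (w : List α) (t : α → Nat) (D : α → List β)
    (hlen : ∀ a ∈ w, (D a).length = t a) (h : (w.map t).sum = 0) : w.flatMap D = [] := by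
  apply List.eq_nil_of_length_eq_zero
  rw [List.length_flatMap, ← h]
  exact congrArg List.sum (List.map_congr_left hlen)

theorem pv_flatMap_one {α β : Type} (t : α → Nat) (D : α → List β) :
    ∀ (w : List α), (∀ a ∈ w, (D a).length = t a) → (w.map t).sum = 1 →
    ∃ a₀ p, w.find? (fun a => t a = 1) = some a₀ ∧ w.flatMap D = [p] ∧ D a₀ = [p] := by
  intro w
  induction w with
  | nil => intro _ h; simp at h
  | cons a w' ih =>
    intro hlen hsum
    simp only [List.map_cons, List.sum_cons] at hsum
    by_cases h1 : t a = 1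
    · have hz : (w'.map t).sum = 0 := by omega
      have hda : (D a).length = 1 := by
        rw [hlen a List.mem_cons_self]; exact h1
      obtain ⟨p, hp⟩ := List.length_eq_one_iff.mp hda
      refine ⟨a, p, ?_, ?_, hp⟩
      · simp [h1]
      · rw [List.flatMap_cons, hp,
          pv_flatMap_nil_of_sum_zero w' t D (fun x hx => hlen x (List.mem_cons_of_mem _ hx)) hz]
        simp
    · have h0 : t a = 0 := by omega
      have hda : D a = [] := by
        apply List.eq_nil_of_length_eq_zero
        rw [hlen a List.mem_cons_self]; exact h0
      obtain ⟨a₀, p, hf, hfm, hd⟩ :=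
        ih (fun x hx => hlen x (List.mem_cons_of_mem _ hx)) (by omega)
      refine ⟨a₀, p, ?_, ?_, hd⟩
      · simp [h1, hf]
      · rw [List.flatMap_cons, hda, List.nil_append, hfm]

theorem pvHSS_slice (g : List (List String)) (i : Nat) (h1 : 1 ≤ i) (h2 : i < g.length) :
    pvHSS (PySem.List.slice g (some ((i : Int) - ((min i (g.length - i) : Nat) : Int)))
                             (some ((i : Int) + ((min i (g.length - i) : Nat) : Int))))
      = (((List.range' (i - min i (g.length - i)) (min i (g.length - i))).flatMap
            (pvPairD g i)).map
          (fun p => (p.1 - ((i - min i (g.length - i) : Nat) : Int), p.2))) := by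
  set n := g.length with hn
  set w := min i (n - i) with hwdef
  set off := i - w with hoffdef
  have hw1 : w ≤ i := by omega
  have hw2 : w ≤ n - i := by omega
  have hc1 : (i : Int) - ((w : Nat) : Int) = ((off : Nat) : Int) := by omega
  have hc2 : (i : Int) + ((w : Nat) : Int) = ((off : Nat) : Int) + ((2 * w : Nat) : Int) := by omega
  rw [hc1, hc2, PySem.List.slice_natCast_add]
  set sub := (g.drop off).take (2 * w) with hsubdef
  have hlen : sub.length = 2 * w := by
    simp [hsubdef]
    omega
  have hrow : ∀ k, k < 2 * w → sub.getD k [] = g.getD (off + k) [] := by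
    intro k hk
    simp [hsubdef, List.getD, hk, List.getElem?_drop]
  simp only [pvHSS, hlen]
  have hdiv : 2 * w / 2 = w := by omega
  rw [hdiv]
  have hstep : ∀ (acc : List (Int × Int)) (k : Nat), k ∈ List.range w →
      (List.range (sub.getD k []).length).foldl
        (fun acc2 j =>
          if (sub.getD k []).getD j "" ≠ (sub.getD (2 * w - k - 1) []).getD j "" then
            acc2 ++ [if (sub.getD k []).getD j "" = "." then ((k : Int), (j : Int))
                     else (((2 * w - k - 1 : Nat) : Int), (j : Int))]
          else acc2)
        acc
      = acc ++ ((pvPairD g i (off + k)).map (fun p => (p.1 - ((off : Nat) : Int), p.2))) := by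
    intro acc k hk
    have hkw := List.mem_range.mp hk
    have e1 := hrow k (by omega)
    have e2 := hrow (2 * w - k - 1) (by omega)
    have e3 : off + (2 * w - k - 1) = 2 * i - 1 - (off + k) := by omega
    rw [e3] at e2
    simp only [e1, e2]
    rw [PySem.List.foldl_append_ite]
    unfold pvPairD pvDC pvPick
    rw [List.map_map]
    congr 1
    apply List.map_congr_left
    intro j hj
    have hcast2 : ((2 * i - 1 - (off + k) : Nat) : Int) - ((off : Nat) : Int) = ((2 * w - k - 1 : Nat) : Int) := by omega
    by_cases hc : (g.getD (off + k) []).getD j "" = "." <;>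
      simp only [List.getD] at hc <;>
      simp [List.getD, hc, hcast2]
  refine Eq.trans (PySem.List.foldl_congr_mem (List.range w) _
    (fun acc k => acc ++ ((pvPairD g i (off + k)).map (fun p => (p.1 - ((off : Nat) : Int), p.2))))
    [] hstep) ?_
  rw [PySem.List.foldl_append_eq_flatMap]
  rw [List.range'_eq_map_range]
  simp [List.map_flatMap, List.flatMap_map]

-- the window flatMap's length is pvCnt
theorem pv_L_len (g : List (List String)) (i : Nat) :
    ((List.range' (2 * i - g.length) (i - (2 * i - g.length))).flatMap (pvPairD g i)).length
      = pvCnt g i := by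
  rw [List.length_flatMap]
  unfold pvCnt
  refine congrArg List.sum (List.map_congr_left ?_)
  intro a _
  unfold pvPairD
  rw [List.length_map]

-- A's per-line body equals pvLine
theorem pv_A_line (g : List (List String)) (i : Nat) (h1 : 1 ≤ i) (h2 : i < g.length) :
    (let w := min i (g.length - i)
     let s := pvHSS (PySem.List.slice g (some ((i : Int) - (w : Int))) (some ((i : Int) + (w : Int))))
     if s.length = 1 then
       some ((s.headD (0, 0)).1 + ((i : Int) - (w : Int)), (s.headD (0, 0)).2)
     else none)
      = pvLine g i := by
  have e2 : i - (2 * i - g.length) = min i (g.length - i) := by omega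
  have e1 : 2 * i - g.length = i - min i (g.length - i) := by omega
  simp only [pvLine]
  rw [e2, e1]
  rw [pvHSS_slice g i h1 h2]
  generalize List.flatMap (pvPairD g i) (List.range' (i - min i (g.length - i)) (min i (g.length - i))) = L
  rcases L with _ | ⟨p, t⟩
  · simp
  · rcases t with _ | ⟨q, t'⟩
    · simp
    · simp

-- B's per-line body equals pvLine on a raise-free line
theorem pv_B_line (g : List (List String)) (i : Nat) (h1 : 1 ≤ i) (h2 : i < g.length)
    (hOK : pvOK g i = true) :
    (let lo := 2 * i - g.length
     if ((List.range' lo (i - lo)).map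
           (fun a => (((pvTable g).getD a []).getD (2 * i - 1 - a) 0))).sum = 1 then
       match (List.range' lo (i - lo)).find?
           (fun a => (((pvTable g).getD a []).getD (2 * i - 1 - a) 0) = 1) with
       | none => none
       | some a =>
         match (List.range (min (g.getD a []).length (g.getD (2 * i - 1 - a) []).length)).find?
             (fun j => (g.getD a []).getD j "" ≠ (g.getD (2 * i - 1 - a) []).getD j "") with
         | none => none
         | some j =>
           some (if (g.getD a []).getD j "" = "." then ((a : Int), (j : Int))
                 else (((2 * i - 1 - a : Nat) : Int), (j : Int)))
     else none)
      = pvLine g i := by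
  have hOK' := List.all_eq_true.mp hOK
  have hmem : ∀ a ∈ List.range' (2 * i - g.length) (i - (2 * i - g.length)),
      a < g.length ∧ 2 * i - 1 - a < g.length ∧
      (g.getD a []).length ≤ (g.getD (2 * i - 1 - a) []).length := by
    intro a ha
    rw [List.mem_range'_1] at ha
    exact ⟨by omega, by omega, by simpa using hOK' a (by rw [List.mem_range'_1]; omega)⟩
  have htab : ∀ a ∈ List.range' (2 * i - g.length) (i - (2 * i - g.length)),
      (((pvTable g).getD a []).getD (2 * i - 1 - a) 0) = (pvDC g a (2 * i - 1 - a)).length := by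
    intro a ha
    obtain ⟨ha1, ha2, ha3⟩ := hmem a ha
    rw [pv_table_getD g a _ ha1 ha2, pv_zipDiff_eq_DC g a _ ha3]
  have hsum : ((List.range' (2 * i - g.length) (i - (2 * i - g.length))).map
        (fun a => (((pvTable g).getD a []).getD (2 * i - 1 - a) 0))).sum
      = pvCnt g i := by
    unfold pvCnt
    exact congrArg List.sum (List.map_congr_left htab)
  simp only [hsum, pvLine]
  have hlen1 : ((List.range' (2 * i - g.length) (i - (2 * i - g.length))).flatMap (pvPairD g i)).length = pvCnt g i := pv_L_len g i
  by_cases hone : pvCnt g i = 1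
  · rw [if_pos hone, if_pos (by rw [hlen1]; exact hone)]
    have hone' : ((List.range' (2 * i - g.length) (i - (2 * i - g.length))).map
        (fun a => (pvDC g a (2 * i - 1 - a)).length)).sum = 1 := hone
    obtain ⟨a₀, p, hfind, hfm, hda⟩ := pv_flatMap_one
      (fun a => (pvDC g a (2 * i - 1 - a)).length) (pvPairD g i)
      (List.range' (2 * i - g.length) (i - (2 * i - g.length)))
      (fun a _ => by unfold pvPairD; rw [List.length_map])
      hone'
    have hfind' : (List.range' (2 * i - g.length) (i - (2 * i - g.length))).find?
        (fun a => (((pvTable g).getD a []).getD (2 * i - 1 - a) 0) = 1) = some a₀ := by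
      rw [pv_find?_congr (fun a ha => by rw [htab a ha])]
      exact hfind
    rw [hfind', hfm]
    dsimp only
    have ha₀mem : a₀ ∈ List.range' (2 * i - g.length) (i - (2 * i - g.length)) :=
      List.mem_of_find?_eq_some hfind
    obtain ⟨_, _, hle⟩ := hmem a₀ ha₀mem
    -- the unique differing pair has exactly one differing column j₀; B's inner find? hits it
    unfold pvPairD at hda
    rcases hdc : pvDC g a₀ (2 * i - 1 - a₀) with _ | ⟨j₀, tj⟩
    · rw [hdc] at hda; simp at hda
    · rw [hdc] at hda
      simp only [List.map_cons] at hda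
      have htj : tj = [] := by
        rcases tj with _ | _
        · rfl
        · simp at hda
      subst htj
      simp only [List.map_nil, List.cons.injEq] at hda
      have hmin : min (g.getD a₀ []).length (g.getD (2 * i - 1 - a₀) []).length
          = (g.getD a₀ []).length := min_eq_left hle
      rw [hmin]
      unfold pvDC at hdc
      rw [pv_find?_of_filter hdc]
      dsimp only
      simp only [List.headD_cons]
      rw [← hda.1]
      rfl
  · rw [if_neg hone, if_neg (by rw [hlen1]; exact hone)]

-- if every scanned line of g is raise-free, the two scanners agree on g
theorem pv_grid_eq (g : List (List String))
    (hOK : ∀ i, 1 ≤ i → i < g.length → pvOK g i = true) :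
    pvHS g = pvFindT g := by
  unfold pvHS pvFindT
  refine pv_findSome?_congr ?_
  intro i hi
  rw [List.mem_range'_1] at hi
  have h1 : 1 ≤ i := hi.1
  have h2 : i < g.length := by omega
  rw [pv_A_line g i h1 h2, pv_B_line g i h1 h2 (hOK i h1 h2)]

-- every row of the transposed grid has the original number of rows as its length
theorem pv_zipT_row (p : List (List String)) (k : Nat) (hk : k < (pvZipT p).length) :
    ((pvZipT p).getD k []).length = p.length := by
  rcases p with _ | ⟨r0, tl⟩
  · simp [pvZipT] at hk
  · unfold pvZipT at hk ⊢
    rw [List.getD_eq_getElem _ _ hk, List.getElem_map, List.length_map]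

-- the transposed grid is rectangular, so every line of its scan is raise-free
theorem pv_zipT_OK (p : List (List String)) (i : Nat) : pvOK (pvZipT p) i = true := by
  rw [pvOK, List.all_eq_true]
  intro a ha
  rw [List.mem_range'_1] at ha
  set T := pvZipT p with hT
  have h1 : a < T.length := by omega
  have h2 : 2 * i - 1 - a < T.length := by omega
  rw [decide_eq_true_eq, pv_zipT_row p a h1, pv_zipT_row p _ h2]

-- a findSome? scan is pinned by none-prefixes and one common hit
theorem pv_scan_accept {β : Type} (f g' : Nat → Option β) (n i : Nat) (v : β)
    (h1 : 1 ≤ i) (h2 : i < n)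
    (hprev : ∀ a, 1 ≤ a → a < i → f a = none ∧ g' a = none)
    (hfi : f i = some v) (hgi : g' i = some v) :
    (List.range' 1 (n - 1)).findSome? f = (List.range' 1 (n - 1)).findSome? g' := by
  have e1 := @List.range'_append 1 (i - 1) (n - i) 1
  simp only [one_mul] at e1
  rw [show 1 + (i - 1) = i by omega] at e1
  rw [show i - 1 + (n - i) = n - 1 by omega] at e1
  have hsplit : List.range' 1 (n - 1)
      = List.range' 1 (i - 1) ++ i :: List.range' (i + 1) (n - 1 - i) := by
    rw [← e1, show n - i = (n - 1 - i) + 1 by omega, List.range'_succ]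
  have hm : ∀ a ∈ List.range' 1 (i - 1), 1 ≤ a ∧ a < i := by
    intro a ha; rw [List.mem_range'_1] at ha; omega
  rw [hsplit,
    pv_findSome?_prefix _ _ _ f v (fun a ha => (hprev a (hm a ha).1 (hm a ha).2).1) hfi,
    pv_findSome?_prefix _ _ _ g' v (fun a ha => (hprev a (hm a ha).1 (hm a ha).2).2) hgi]

-- one accepted line (count 1, raise-free) after raise-free failing lines pins both scanners
theorem pv_grid_eq_accept (g : List (List String)) (i : Nat)
    (hi1 : 1 ≤ i) (hi2 : i < g.length) (hc : pvCnt g i = 1) (hok : pvOK g i = true)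
    (hprev : ∀ i', 1 ≤ i' → i' < i → pvCnt g i' ≠ 1 ∧ pvOK g i' = true) :
    pvHS g = pvFindT g := by
  have hnone : ∀ i', 1 ≤ i' → i' < i → pvLine g i' = none := by
    intro i' h1 h2
    have hcne := (hprev i' h1 h2).1
    unfold pvLine
    rw [if_neg (by rw [pv_L_len g i']; exact hcne)]
  have hsome : ∃ v, pvLine g i = some v := by
    unfold pvLine
    rw [if_pos (by rw [pv_L_len g i]; exact hc)]
    exact ⟨_, rfl⟩
  obtain ⟨v, hv⟩ := hsome
  unfold pvHS pvFindT
  refine pv_scan_accept _ _ g.length i v hi1 hi2 ?_ ?_ ?_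
  · intro a ha1 ha2
    refine ⟨(pv_A_line g a ha1 (by omega)).trans (hnone a ha1 ha2),
      (pv_B_line g a ha1 (by omega) (hprev a ha1 ha2).2).trans (hnone a ha1 ha2)⟩
  · exact (pv_A_line g i hi1 hi2).trans hv
  · exact (pv_B_line g i hi1 hi2 hok).trans hv

theorem pv_zipTB_eq : pvZipTB = pvZipT := rfl

-- ===== VERDICT (by name: the statement is the Claim_ definition above) =====
theorem desmudge_spec : Claim_equal_desmudge := by
  intro pattern _ hpre
  have hmain : pvHS pattern = pvFindT pattern ∧ pvHS (pvZipT pattern) = pvFindT (pvZipT pattern) := by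
    constructor
    · rcases hpre with ⟨i, hiI, ⟨hc, hok⟩, hprev⟩ | ⟨hall, _⟩
      · rw [Finset.mem_Ico] at hiI
        exact pv_grid_eq_accept pattern i hiI.1 hiI.2 hc hok
          (fun i' h1 h2 => hprev i' (Finset.mem_Ico.mpr ⟨h1, h2⟩))
      · exact pv_grid_eq pattern
          (fun i h1 h2 => (hall i (Finset.mem_Ico.mpr ⟨h1, h2⟩)).2)
    · exact pv_grid_eq (pvZipT pattern) (fun i _ _ => pv_zipT_OK pattern i)
  unfold Spec_desmudge desmudge desmudge_alt
  rw [pv_zipTB_eq, hmain.1, hmain.2]
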